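-- pv_equiv track=rewrite | github.com/adrianstaniec/advent_of_code | 18/sol.py | check_if_unnecessary_outer_parens
-- ===== SOURCE A (Python) =====
-- def check_if_unnecessary_outer_parens(inp):
--     if inp[0] != "(" or inp[-1] != ")":
--         return False
--     pc = 0
--     for i, c in enumerate(inp):
--         if c == "(":
--             pc += 1
--         if c == ")":
--             pc -= 1
--             if pc == 0:
--                 if i == len(inp) - 1:
--                     return True
--                 else:
--                     return False
--     return False
-- ===== SOURCE B (Python) =====
-- def check_if_unnecessary_outer_parens(inp):
--     if inp[0] != "(" or inp[-1] != ")":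
--         return False
--     bal = []
--     t = 0
--     for c in inp:
--         t += 1 if c == "(" else -1 if c == ")" else 0
--         bal.append(t)
--     return min(bal[:-1]) >= 1 and bal[-1] == 0
-- ===== Notes on version B (the rewrite author's own statement) =====
-- stated objective: alternative
-- what changed: A's fused single-pass counter with early returns at the first zero crossing is replaced by materializing the full running-balance table in one pass and then judging it with two reductions: min of all but the last entry >= 1 and last entry == 0.
import Mathlib
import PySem

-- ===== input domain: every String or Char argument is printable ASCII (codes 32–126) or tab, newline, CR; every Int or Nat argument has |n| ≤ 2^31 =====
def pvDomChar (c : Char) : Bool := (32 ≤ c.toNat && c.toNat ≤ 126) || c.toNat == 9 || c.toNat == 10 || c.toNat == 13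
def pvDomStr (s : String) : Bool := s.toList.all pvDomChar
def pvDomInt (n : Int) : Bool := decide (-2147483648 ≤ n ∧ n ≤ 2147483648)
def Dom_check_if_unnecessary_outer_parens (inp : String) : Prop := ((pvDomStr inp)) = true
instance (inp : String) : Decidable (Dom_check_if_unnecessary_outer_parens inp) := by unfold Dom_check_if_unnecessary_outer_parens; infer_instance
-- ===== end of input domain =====

-- B replaces A's fused early-exit counter scan by a materialized running-balance table judged
-- with min/last reductions (objective: alternative decomposition, same cost).

-- ===== PORT A =====
-- A's for-loop over enumerate(inp): current index i, counter pc; early returns kept as returns.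
def pvALoop (n : Int) : List Char → Int → Int → Bool
  | [], _, _ => false
  | c :: rest, i, pc =>
    let pc1 := if c = '(' then pc + 1 else pc
    if c = ')' then
      let pc2 := pc1 - 1
      if pc2 = 0 then decide (i = n - 1)
      else pvALoop n rest (i + 1) pc2
    else pvALoop n rest (i + 1) pc1

def check_if_unnecessary_outer_parens (inp : String) : Bool :=
  let cs := inp.toList
  match PySem.List.pyGet? cs 0, PySem.List.pyGet? cs (-1) with
  | some c0, some cl =>
    if c0 ≠ '(' ∨ cl ≠ ')' then false
    else pvALoop (cs.length : Int) cs 0 0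
  | _, _ => false

-- ===== PORT B =====
def check_if_unnecessary_outer_parens_alt (inp : String) : Bool :=
  let cs := inp.toList
  match PySem.List.pyGet? cs 0 with
  | none => false
  | some c0 =>
    match PySem.List.pyGet? cs (-1) with
    | none => false
    | some cl =>
    if c0 ≠ '(' ∨ cl ≠ ')' then false
    else
      -- bal: running-balance table built by one append-loop (Source B's for-loop)
      let bal := (cs.foldl (fun (p : List Int × Int) c =>
        let t := p.2 + (if c = '(' then 1 else if c = ')' then -1 else 0)
        (p.1 ++ [t], t)) (([] : List Int), 0)).1
      -- min(bal[:-1]) >= 1 and bal[-1] == 0  (min/pyGet? cannot fail here: guard forces len ≥ 2)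
      match PySem.List.min? (PySem.List.slice bal none (some (-1))) (fun x => x) with
      | some m =>
        decide (1 ≤ m) &&
          (match PySem.List.pyGet? bal (-1) with
           | some l => decide (l = 0)
           | none => false)
      | none => false

-- ===== PRECONDITION & SPEC =====
-- Pre_ excludes only the empty string, on which both A and B raise IndexError at inp[0].
def Pre_check_if_unnecessary_outer_parens (inp : String) : Prop := inp ≠ ""
instance (inp : String) : Decidable (Pre_check_if_unnecessary_outer_parens inp) := by unfold Pre_check_if_unnecessary_outer_parens; infer_instance
def pvWitness_check_if_unnecessary_outer_parens : String := "(a)"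

def Spec_check_if_unnecessary_outer_parens (inp : String) (out : Bool) : Prop := out = check_if_unnecessary_outer_parens_alt inp
instance (inp : String) (out : Bool) : Decidable (Spec_check_if_unnecessary_outer_parens inp out) := by unfold Spec_check_if_unnecessary_outer_parens; infer_instance

-- ===== CLAIM (what is proved, stated in full; the proofs are below) =====
def Claim_equal_check_if_unnecessary_outer_parens : Prop := ∀ (inp : String), Dom_check_if_unnecessary_outer_parens inp → Pre_check_if_unnecessary_outer_parens inp → Spec_check_if_unnecessary_outer_parens inp (check_if_unnecessary_outer_parens inp)

-- ===== LEMMAS AND PROOFS =====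

-- running balances of cs starting from pc
def pvBal : Int → List Char → List Int
  | _, [] => []
  | pc, c :: rest =>
    let t := pc + (if c = '(' then 1 else if c = ')' then -1 else 0)
    t :: pvBal t rest

-- the table judgement B computes, phrased structurally
def pvForm (bs : List Int) : Bool :=
  bs.dropLast.all (fun x => decide (1 ≤ x)) && decide (bs.getLastD 1 = 0)

lemma pvBal_ne_nil (pc : Int) (c : Char) (rest : List Char) : pvBal pc (c :: rest) ≠ [] := by
  simp [pvBal]

lemma pvFoldl_bal (cs : List Char) : ∀ (acc : List Int) (t : Int),
    (cs.foldl (fun (p : List Int × Int) c =>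
        (p.1 ++ [p.2 + if c = '(' then 1 else if c = ')' then -1 else 0],
          p.2 + if c = '(' then 1 else if c = ')' then -1 else 0)) (acc, t)).1
      = acc ++ pvBal t cs := by
  induction cs with
  | nil => intro acc t; simp [pvBal]
  | cons c rest ih =>
    intro acc t
    simp only [List.foldl_cons, pvBal]
    rw [ih]
    simp

lemma pvForm_cons (t : Int) (l : List Int) (ht : 1 ≤ t) : pvForm (t :: l) = pvForm l := by
  cases l with
  | nil => simp [pvForm]; omega
  | cons b bs =>
    simp only [pvForm, List.dropLast_cons₂, List.all_cons, List.getLastD_cons]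
    simp [ht]

lemma pvALoop_eq (n : Int) (cs : List Char) : ∀ (i pc : Int), 1 ≤ pc → i + cs.length = n →
    pvALoop n cs i pc = pvForm (pvBal pc cs) := by
  induction cs with
  | nil =>
    intro i pc hpc _
    simp [pvALoop, pvBal, pvForm]
  | cons c rest ih =>
    intro i pc hpc hn
    simp only [List.length_cons] at hn
    by_cases hc : c = ')'
    · subst hc
      have hne : (')' : Char) ≠ '(' := by decide
      simp only [pvALoop, if_neg hne]
      have hbal : pvBal pc (')' :: rest) = (pc - 1) :: pvBal (pc - 1) rest := by
        simp [pvBal, hne, sub_eq_add_neg]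
      by_cases h0 : pc - 1 = 0
      · simp only [if_pos h0]
        rw [hbal, h0]
        cases rest with
        | nil =>
          have hi : i = n - 1 := by
            simp only [List.length_nil] at hn; push_cast at hn; omega
          simp [pvBal, pvForm, hi]
        | cons d ds =>
          have hi : ¬ (i = n - 1) := by
            simp only [List.length_cons] at hn
            push_cast at hn
            omega
          have hnn := pvBal_ne_nil 0 d ds
          rw [decide_eq_false hi]
          cases hbb : pvBal 0 (d :: ds) with
          | nil => exact absurd hbb hnn
          | cons b bs =>
            simp [pvForm, List.dropLast_cons₂]
      · simp only [if_neg h0]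
        rw [hbal, pvForm_cons _ _ (by omega)]
        exact ih (i + 1) (pc - 1) (by omega) (by push_cast at hn ⊢; omega)
    · simp only [pvALoop, if_neg hc]
      by_cases hp : c = '('
      · subst hp
        have hbal : pvBal pc ('(' :: rest) = (pc + 1) :: pvBal (pc + 1) rest := by
          simp [pvBal]
        rw [if_pos rfl, hbal, pvForm_cons _ _ (by omega)]
        exact ih (i + 1) (pc + 1) (by omega) (by push_cast at hn ⊢; omega)
      · have hbal : pvBal pc (c :: rest) = pc :: pvBal pc rest := by
          simp [pvBal, hp, hc]
        rw [if_neg hp, hbal, pvForm_cons _ _ hpc]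
        exact ih (i + 1) pc hpc (by push_cast at hn ⊢; omega)

lemma pvFoldl_min_one (l : List Int) : ∀ (a : Int),
    (decide (1 ≤ l.foldl min a)) = ((decide (1 ≤ a)) && l.all (fun x => decide (1 ≤ x))) := by
  induction l with
  | nil => intro a; simp
  | cons x xs ih =>
    intro a
    rw [List.foldl_cons, ih (min a x)]
    simp only [List.all_cons]
    have hmin : decide (1 ≤ min a x) = (decide (1 ≤ a) && decide (1 ≤ x)) := by
      by_cases h1 : 1 ≤ a <;> by_cases h2 : 1 ≤ x <;>
        simp [h1, h2]
    rw [hmin, Bool.and_assoc]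

-- B's else-branch computes pvForm of the balance table
lemma pvAlt_form (c : Char) (rest : List Char) (hrest : rest ≠ []) :
    (match PySem.List.min? (PySem.List.slice
        ((c :: rest).foldl (fun (p : List Int × Int) c =>
          (p.1 ++ [p.2 + if c = '(' then 1 else if c = ')' then -1 else 0],
            p.2 + if c = '(' then 1 else if c = ')' then -1 else 0)) (([] : List Int), 0)).1
        none (some (-1))) (fun x => x) with
     | some m =>
       decide (1 ≤ m) &&
         (match ((c :: rest).foldl (fun (p : List Int × Int) c =>
              (p.1 ++ [p.2 + if c = '(' then 1 else if c = ')' then -1 else 0],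
                p.2 + if c = '(' then 1 else if c = ')' then -1 else 0)) (([] : List Int), 0)).1.getLast? with
          | some l => decide (l = 0)
          | none => false)
     | none => false) = pvForm (pvBal 0 (c :: rest)) := by
  simp only [pvFoldl_bal, List.nil_append]
  have hbal : pvBal 0 (c :: rest) =
      (0 + (if c = '(' then 1 else if c = ')' then -1 else 0)) :: pvBal _ rest := rfl
  set t := 0 + (if c = '(' then (1:Int) else if c = ')' then -1 else 0) with ht
  rw [hbal]
  rw [PySem.List.slice_to_neg_one]
  cases hb : pvBal t rest with
  | nil =>
    have : rest = [] := by cases rest with | nil => rfl | cons d ds => exact absurd hb (pvBal_ne_nil _ d ds)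
    exact absurd this hrest
  | cons b bs =>
    simp only [List.dropLast_cons₂, PySem.List.min?_id_cons]
    have hlast : (t :: b :: bs).getLast? = some ((b :: bs).getLastD 1) := by
      rw [List.getLast?_cons_cons]
      cases h : (b :: bs).getLast? with
      | none => simp at h
      | some v =>
        have : (b :: bs).getLastD 1 = v := by
          rw [List.getLastD_eq_getLast?, h]; rfl
        rw [this]
    rw [hlast]
    simp only [pvForm, List.dropLast_cons₂, List.getLastD_cons]
    rw [pvFoldl_min_one]
    simp [List.all_cons, Bool.and_assoc]

-- ===== VERDICT (by name: the statement is the Claim_ definition above) =====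
theorem check_if_unnecessary_outer_parens_spec : Claim_equal_check_if_unnecessary_outer_parens := by
  intro inp _ hpre
  unfold Spec_check_if_unnecessary_outer_parens
  unfold check_if_unnecessary_outer_parens check_if_unnecessary_outer_parens_alt
  have hne : inp.toList ≠ [] := by
    simpa [String.toList_eq_nil_iff] using hpre
  cases hcs : inp.toList with
  | nil => exact absurd hcs hne
  | cons c rest =>
    simp only [PySem.List.pyGet?_zero_cons, PySem.List.pyGet?_neg_one]
    cases hl : (c :: rest).getLast? with
    | none => simp at hl
    | some cl =>
      dsimp only
      by_cases hguard : c ≠ '(' ∨ cl ≠ ')'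
      · rw [if_pos hguard, if_pos hguard]
      · simp only [not_or, not_not] at hguard
        obtain ⟨hc0, hcl⟩ := hguard
        subst hc0
        have hrest : rest ≠ [] := by
          intro h; subst h
          simp [List.getLast?] at hl
          rw [← hl] at hcl
          exact absurd hcl (by decide)
        have hg : ¬ (('(' : Char) ≠ '(' ∨ cl ≠ ')') := by simp [hcl]
        rw [if_neg hg, if_neg hg]
        rw [pvAlt_form '(' rest hrest]
        -- A side
        have hstep : pvALoop ((('(' :: rest).length : Nat) : Int) ('(' :: rest) 0 0
            = pvALoop ((('(' :: rest).length : Nat) : Int) rest 1 1 := by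
          simp [pvALoop]
        rw [hstep, pvALoop_eq _ rest 1 1 (by omega)
          (by simp only [List.length_cons]; push_cast; omega)]
        have hbal0 : pvBal 0 ('(' :: rest) = 1 :: pvBal 1 rest := by simp [pvBal]
        rw [hbal0, pvForm_cons 1 _ (by omega)]
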